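-- pv_equiv track=rewrite | github.com/ack00gar/FunGen-AI-Powered-Funscript-Generator | funscript/plugins/ultimate_autotune_plugin.py | _keep_extrema
-- ===== SOURCE A (Python) =====
-- from typing import Dict, Any, List, Optional
--
-- def _keep_extrema(actions: List[Dict]) -> List[Dict]:
--     """Keep only first, last, and points where direction changes.
--     A funscript device interpolates linearly — monotonic intermediates are redundant."""
--     if len(actions) <= 2:
--         return actions
--     out = [actions[0]]
--     for i in range(1, len(actions) - 1):
--         d1 = actions[i]['pos'] - out[-1]['pos']
--         d2 = actions[i + 1]['pos'] - actions[i]['pos']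
--         # Keep on direction reversal or plateau edge
--         if d1 * d2 < 0 or (d1 == 0) != (d2 == 0):
--             out.append(actions[i])
--     out.append(actions[-1])
--     return out
-- ===== SOURCE B (Python) =====
-- def _keep_extrema(actions):
--     """Table-first rewrite: compute consecutive deltas once, then select by adjacent deltas."""
--     if len(actions) <= 2:
--         return actions
--     deltas = [nxt['pos'] - cur['pos'] for cur, nxt in zip(actions, actions[1:])]
--     middle = [act for act, d1, d2 in zip(actions[1:], deltas, deltas[1:])
--               if d1 * d2 < 0 or (d1 == 0) != (d2 == 0)]
--     return [actions[0]] + middle + [actions[-1]]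
-- ===== Notes on version B (the rewrite author's own statement) =====
-- stated objective: alternative
-- what changed: Replaces A's stateful scan that anchors d1 to the last kept point (out[-1]) with a precomputed table of consecutive deltas followed by a stateless selection pass over adjacent deltas (valid because dropped runs are monotone-or-flat, so the anchor delta keeps the same sign).
import Mathlib
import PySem

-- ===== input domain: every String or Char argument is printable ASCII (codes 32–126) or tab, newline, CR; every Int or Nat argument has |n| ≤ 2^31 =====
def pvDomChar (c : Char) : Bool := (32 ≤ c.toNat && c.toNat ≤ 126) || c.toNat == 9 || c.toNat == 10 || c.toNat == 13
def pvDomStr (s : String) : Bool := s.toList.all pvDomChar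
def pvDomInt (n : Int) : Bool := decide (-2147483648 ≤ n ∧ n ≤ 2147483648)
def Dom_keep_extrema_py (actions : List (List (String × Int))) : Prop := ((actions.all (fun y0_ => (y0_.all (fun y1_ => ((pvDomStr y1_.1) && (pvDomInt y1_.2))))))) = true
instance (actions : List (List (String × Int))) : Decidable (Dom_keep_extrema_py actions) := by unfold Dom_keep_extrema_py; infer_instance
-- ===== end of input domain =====

-- B replaces A's stateful scan (anchored at the last kept point) by a precomputed table of
-- consecutive deltas plus a stateless adjacent-delta selection pass; objective: alternative
-- decomposition (same O(n) cost).

-- a['pos'] (the 'pos' lookup both programs perform; KeyError is excluded by Pre_)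
def pvPos (a : List (String × Int)) : Int := (PySem.Dict.mk a).getD "pos" 0

-- the shared keep condition: d1 * d2 < 0 or (d1 == 0) != (d2 == 0)
def pvKeep (d1 d2 : Int) : Bool := decide (d1 * d2 < 0) || ((d1 == 0) != (d2 == 0))

-- ===== PORT A =====
def keep_extrema_py (actions : List (List (String × Int))) : List (List (String × Int)) :=
  if actions.length ≤ 2 then actions
  else
    let out :=
      (PySem.List.pyRange 1 ((actions.length : Int) - 1) 1).foldl
        (fun out i =>
          if pvKeep (pvPos (PySem.List.pyGetD actions i []) - pvPos (PySem.List.pyGetD out (-1) []))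
                    (pvPos (PySem.List.pyGetD actions (i + 1) []) - pvPos (PySem.List.pyGetD actions i []))
          then out ++ [PySem.List.pyGetD actions i []]
          else out)
        [PySem.List.pyGetD actions 0 []]
    out ++ [PySem.List.pyGetD actions (-1) []]

-- ===== PORT B =====
def keep_extrema_py_alt (actions : List (List (String × Int))) : List (List (String × Int)) :=
  if actions.length ≤ 2 then actions
  else
    let deltas := (actions.zip actions.tail).map (fun p => pvPos p.2 - pvPos p.1)
    let middle :=
      ((actions.tail.zip (deltas.zip deltas.tail)).filter
          (fun q => pvKeep q.2.1 q.2.2)).map (fun q => q.1)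
    [PySem.List.pyGetD actions 0 []] ++ middle ++ [PySem.List.pyGetD actions (-1) []]

-- ===== PRECONDITION & SPEC =====
-- Pre_ excludes exactly the inputs where Python A raises KeyError: length > 2 with some
-- action lacking the 'pos' key. On length ≤ 2 A returns without any lookup.
def Pre_keep_extrema_py (actions : List (List (String × Int))) : Prop :=
  actions.length ≤ 2 ∨ (actions.all (fun a => (PySem.Dict.mk a).contains "pos")) = true
instance (actions : List (List (String × Int))) : Decidable (Pre_keep_extrema_py actions) := by
  unfold Pre_keep_extrema_py; infer_instance

def pvWitness_keep_extrema_py : (List (List (String × Int))) :=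
  [[("pos", 0)], [("pos", 50)], [("pos", 20)], [("pos", 20)]]

def Spec_keep_extrema_py (actions : List (List (String × Int))) (out : List (List (String × Int))) : Prop := out = keep_extrema_py_alt actions
instance (actions : List (List (String × Int))) (out : List (List (String × Int))) : Decidable (Spec_keep_extrema_py actions out) := by unfold Spec_keep_extrema_py; infer_instance

-- ===== CLAIM (what is proved, stated in full; the proofs are below) =====
def Claim_equal_keep_extrema_py : Prop := ∀ (actions : List (List (String × Int))), Dom_keep_extrema_py actions → Pre_keep_extrema_py actions → Spec_keep_extrema_py actions (keep_extrema_py actions)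

-- ===== LEMMAS AND PROOFS =====

-- structural mirror of A's loop: state = out, remaining suffix of actions
def goA (out : List (List (String × Int))) :
    List (List (String × Int)) → List (List (String × Int))
  | x :: y :: t =>
      if pvKeep (pvPos x - pvPos (PySem.List.pyGetD out (-1) [])) (pvPos y - pvPos x)
      then goA (out ++ [x]) (y :: t)
      else goA out (y :: t)
  | _ => out

-- structural mirror of B's selection pass: carries only the previous action
def goB (p : List (String × Int)) :
    List (List (String × Int)) → List (List (String × Int))
  | x :: y :: t =>
      (if pvKeep (pvPos x - pvPos p) (pvPos y - pvPos x) then [x] else []) ++ goB x (y :: t)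
  | _ => []

-- pvKeep depends on d1 only through its sign
lemma pvKeep_congr (a a' b : Int) (h : Int.sign a = Int.sign a') :
    pvKeep a b = pvKeep a' b := by
  have h0 : a = 0 ↔ a' = 0 := by
    constructor <;> intro hz
    · apply Int.sign_eq_zero_iff_zero.mp; rw [← h, hz]; rfl
    · apply Int.sign_eq_zero_iff_zero.mp; rw [h, hz]; rfl
  have h1 : 0 < a ↔ 0 < a' := by
    rw [← Int.sign_eq_one_iff_pos, ← Int.sign_eq_one_iff_pos, h]
  have h2 : a < 0 ↔ a' < 0 := by
    rw [← Int.sign_eq_neg_one_iff_neg, ← Int.sign_eq_neg_one_iff_neg, h]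
  simp only [pvKeep, mul_neg_iff]
  congr 1
  · exact decide_eq_decide.mpr (by tauto)
  · have hbe : (a == 0) = (a' == 0) := by
      by_cases hz : a = 0
      · simp [hz, h0.mp hz]
      · have hz' : ¬ a' = 0 := fun hh => hz (h0.mpr hh)
        simp [hz, hz']
    rw [hbe]

-- a dropped step does not change the sign of the delta from the anchor
lemma sign_add_of_not_keep (a b : Int) (h : pvKeep a b = false) :
    Int.sign (a + b) = Int.sign b := by
  have hcond : ¬ (a * b < 0) ∧ ((a = 0) ↔ (b = 0)) := by
    simp only [pvKeep, Bool.or_eq_false_iff, decide_eq_false_iff_not, bne_eq_false_iff_eq] at h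
    constructor
    · exact h.1
    · constructor <;> intro hx <;> by_cases hy : b = 0 <;> by_cases hy' : a = 0 <;> simp_all
  rcases lt_trichotomy b 0 with hb | hb | hb
  · have ha : a ≤ 0 := by
      by_contra hpos
      exact hcond.1 (mul_neg_of_pos_of_neg (by omega) hb)
    have ha' : a + b < 0 := by omega
    rw [Int.sign_eq_neg_one_iff_neg.mpr ha', Int.sign_eq_neg_one_iff_neg.mpr hb]
  · have : a = 0 := hcond.2.mpr hb
    simp [this, hb]
  · have ha : 0 ≤ a := by
      by_contra hneg
      exact hcond.1 (mul_neg_of_neg_of_pos (by omega) hb)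
    have ha' : 0 < a + b := by omega
    rw [Int.sign_eq_one_iff_pos.mpr ha', Int.sign_eq_one_iff_pos.mpr hb]

-- main invariant: A's anchor (last kept point) and B's previous action give deltas of the
-- same sign to the next action, so the two selections agree
lemma goA_eq_goB :
    ∀ (rest out : List (List (String × Int))) (p : List (String × Int)),
      (∀ x, rest.head? = some x →
        Int.sign (pvPos x - pvPos (PySem.List.pyGetD out (-1) [])) = Int.sign (pvPos x - pvPos p)) →
      goA out rest = out ++ goB p rest := by
  intro rest
  induction rest with
  | nil => intro out p _; simp [goA, goB]
  | cons x rest' ih =>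
    intro out p hinv
    cases rest' with
    | nil => simp [goA, goB]
    | cons y t =>
      have hsign := hinv x rfl
      have hcond : pvKeep (pvPos x - pvPos (PySem.List.pyGetD out (-1) [])) (pvPos y - pvPos x)
          = pvKeep (pvPos x - pvPos p) (pvPos y - pvPos x) :=
        pvKeep_congr _ _ _ hsign
      rw [goA, goB, hcond]
      by_cases hk : pvKeep (pvPos x - pvPos p) (pvPos y - pvPos x) = true
      · rw [if_pos hk, if_pos hk]
        rw [ih (out ++ [x]) x ?_]
        · simp
        · intro z hz
          simp only [List.head?_cons, Option.some.injEq] at hz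
          subst hz
          rw [PySem.List.pyGetD_neg_one_append_singleton]
      · rw [if_neg hk, if_neg hk]
        rw [ih out x ?_]
        · simp
        · intro z hz
          simp only [List.head?_cons, Option.some.injEq] at hz
          subst hz
          have hkeep : pvKeep (pvPos x - pvPos (PySem.List.pyGetD out (-1) []))
              (pvPos y - pvPos x) = false := by
            rw [hcond]; exact Bool.eq_false_iff.mpr hk
          have := sign_add_of_not_keep _ _ hkeep
          have harith : (pvPos x - pvPos (PySem.List.pyGetD out (-1) [])) + (pvPos y - pvPos x)
              = pvPos y - pvPos (PySem.List.pyGetD out (-1) []) := by ring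
          rw [harith] at this
          exact this

-- A's indexed foldl over range(1, len-1) is goA on the suffix
lemma bridgeA (xs : List (List (String × Int))) :
    ∀ (suf : List (List (String × Int))) (j : Nat) (out : List (List (String × Int))),
      xs.drop j = suf →
      (PySem.List.pyRange (j : Int) ((xs.length : Int) - 1) 1).foldl
        (fun out i =>
          if pvKeep (pvPos (PySem.List.pyGetD xs i []) - pvPos (PySem.List.pyGetD out (-1) []))
                    (pvPos (PySem.List.pyGetD xs (i + 1) []) - pvPos (PySem.List.pyGetD xs i []))
          then out ++ [PySem.List.pyGetD xs i []]
          else out) out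
      = goA out suf := by
  intro suf
  induction suf with
  | nil =>
    intro j out hd
    have hlen : xs.length ≤ j := List.drop_eq_nil_iff.mp hd
    rw [PySem.List.pyRange_one_eq_nil (by omega)]
    simp [goA]
  | cons x suf' ih =>
    intro j out hd
    have hj : xs[j]? = some x := by
      have h : (xs.drop j)[0]? = xs[j + 0]? := List.getElem?_drop
      rw [hd] at h
      simpa using h.symm
    have hjlt : j < xs.length := (List.getElem?_eq_some_iff.mp hj).1
    have hx : PySem.List.pyGetD xs (j : Int) [] = x := by
      rw [PySem.List.pyGetD_natCast, List.getD_eq_getElem?_getD, hj]; rfl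
    cases suf' with
    | nil =>
      have hlen : xs.length = j + 1 := by
        have h2 : xs.drop (j + 1) = [] := by
          have h : List.drop 1 (List.drop j xs) = List.drop (j + 1) xs := List.drop_drop
          rw [hd] at h
          simpa using h.symm
        have := List.drop_eq_nil_iff.mp h2
        omega
      rw [PySem.List.pyRange_one_eq_nil (by omega)]
      simp [goA]
    | cons y t =>
      have hj1 : xs[j+1]? = some y := by
        have h : (xs.drop j)[1]? = xs[j + 1]? := List.getElem?_drop
        rw [hd] at h
        simpa using h.symm
      have hy : PySem.List.pyGetD xs ((j : Int) + 1) [] = y := by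
        have : ((j : Int) + 1) = ((j + 1 : Nat) : Int) := by push_cast; ring
        rw [this, PySem.List.pyGetD_natCast, List.getD_eq_getElem?_getD, hj1]; rfl
      have hj1lt : j + 1 < xs.length := (List.getElem?_eq_some_iff.mp hj1).1
      rw [PySem.List.pyRange_one_cons (by omega)]
      rw [List.foldl_cons]
      have hdrop : xs.drop (j + 1) = y :: t := by
        have h : List.drop 1 (List.drop j xs) = List.drop (j + 1) xs := List.drop_drop
        rw [hd] at h
        simpa using h.symm
      have hcast : (j : Int) + 1 = ((j + 1 : Nat) : Int) := by push_cast; ring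
      rw [goA, hx, hy]
      by_cases hk : pvKeep (pvPos x - pvPos (PySem.List.pyGetD out (-1) []))
          (pvPos y - pvPos x) = true
      · rw [if_pos hk, if_pos hk, hcast, ih (j + 1) (out ++ [x]) hdrop]
      · rw [if_neg hk, if_neg hk, hcast, ih (j + 1) out hdrop]

-- B's zip3/filter/map middle pass is goB
lemma bridgeB :
    ∀ (rest : List (List (String × Int))) (p : List (String × Int)),
      ((rest.zip ((((p :: rest).zip rest).map (fun q => pvPos q.2 - pvPos q.1)).zip
          (((p :: rest).zip rest).map (fun q => pvPos q.2 - pvPos q.1)).tail)).filter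
        (fun q => pvKeep q.2.1 q.2.2)).map (fun q => q.1) = goB p rest := by
  intro rest
  induction rest with
  | nil => intro p; simp [goB]
  | cons x rest' ih =>
    intro p
    cases rest' with
    | nil => simp [goB]
    | cons y t =>
      simp only [List.zip_cons_cons, List.map_cons, List.tail_cons, List.filter_cons,
        List.map_cons]
      rw [goB]
      by_cases hk : pvKeep (pvPos x - pvPos p) (pvPos y - pvPos x) = true
      · rw [← ih x]
        simp [hk]
      · rw [← ih x]
        simp [hk]

-- ===== VERDICT (by name: the statement is the Claim_ definition above) =====
theorem keep_extrema_py_spec : Claim_equal_keep_extrema_py := by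
  intro actions _ _
  unfold Spec_keep_extrema_py keep_extrema_py keep_extrema_py_alt
  by_cases hle : actions.length ≤ 2
  · rw [if_pos hle, if_pos hle]
  · rw [if_neg hle, if_neg hle]
    obtain ⟨a, rest, rfl⟩ : ∃ a rest, actions = a :: rest := by
      cases actions with
      | nil => simp at hle
      | cons a rest => exact ⟨a, rest, rfl⟩
    have h0 : PySem.List.pyGetD (a :: rest) (0 : Int) [] = a := PySem.List.pyGetD_zero_cons a rest []
    have hb : (PySem.List.pyRange (1 : Int) (((a :: rest).length : Int) - 1) 1).foldl
        (fun out i =>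
          if pvKeep (pvPos (PySem.List.pyGetD (a :: rest) i []) - pvPos (PySem.List.pyGetD out (-1) []))
                    (pvPos (PySem.List.pyGetD (a :: rest) (i + 1) []) - pvPos (PySem.List.pyGetD (a :: rest) i []))
          then out ++ [PySem.List.pyGetD (a :: rest) i []]
          else out) [a]
        = goA [a] rest := by
      have := bridgeA (a :: rest) rest 1 [a] (by simp)
      simpa using this
    have hmain : goA [a] rest = [a] ++ goB a rest := by
      apply goA_eq_goB
      intro x _
      have : PySem.List.pyGetD [a] (-1 : Int) [] = a := by
        have := PySem.List.pyGetD_neg_one_append_singleton ([] : List (List (String × Int))) a []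
        simpa using this
      rw [this]
    have hbb : ((rest.zip (((((a :: rest).zip rest).map (fun q => pvPos q.2 - pvPos q.1))).zip
          ((((a :: rest).zip rest).map (fun q => pvPos q.2 - pvPos q.1))).tail)).filter
        (fun q => pvKeep q.2.1 q.2.2)).map (fun q => q.1) = goB a rest := bridgeB rest a
    simp only [List.tail_cons, h0]
    rw [hb, hmain, ← hbb]
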